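-- pv_equiv track=rewrite | github.com/SlyBase/homeassistant-openmediavault | custom_components/omv/config_flow.py | _merge_inventory_options
-- ===== SOURCE A (Python) =====
-- from collections.abc import Mapping, Sequence
--
-- def _merge_inventory_options(
--
--     live_options: Sequence[Mapping[str, str]],
--     persisted_options: Sequence[Mapping[str, str]],
-- ) -> list[dict[str, str]]:
--     """Merge live and persisted options without dropping missing persisted values."""
--     merged: dict[str, str] = {}
--     for option in list(live_options) + list(persisted_options):
--         value = str(option["value"])
--         merged.setdefault(value, str(option["label"]))
--     return [
--         {"value": value, "label": merged[value]}
--         for value in sorted(merged, key=str.casefold)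
--     ]
-- ===== SOURCE B (Python) =====
-- def _emit_sorted(pairs, seen):
--     """Recursively emit first occurrences of a (value,label) list already sorted by casefold."""
--     if not pairs:
--         return []
--     (v, l), rest = pairs[0], pairs[1:]
--     if v in seen:
--         return _emit_sorted(rest, seen)
--     return [{"value": v, "label": l}] + _emit_sorted(rest, seen | {v})
--
-- def _merge_inventory_options(live_options, persisted_options):
--     """Merge live and persisted options: sort the raw pairs first, then dedupe recursively."""
--     pairs = [(str(o["value"]), str(o["label"])) for o in live_options]
--     pairs += [(str(o["value"]), str(o["label"])) for o in persisted_options]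
--     pairs.sort(key=lambda p: p[0].casefold())
--     return _emit_sorted(pairs, set())
-- ===== Notes on version B (the rewrite author's own statement) =====
-- stated objective: alternative
-- what changed: B reverses A's phase order: it builds the raw (value,label) pair list, stably sorts it by casefolded value, and then dedupes by a structurally recursive walk with a seen-set, instead of A's dedupe-into-an-insertion-ordered-dict followed by sorting the keys with a dict lookup; correctness rests on the proved fact that first-occurrence dedup commutes with the stable sort.
import Mathlib
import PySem

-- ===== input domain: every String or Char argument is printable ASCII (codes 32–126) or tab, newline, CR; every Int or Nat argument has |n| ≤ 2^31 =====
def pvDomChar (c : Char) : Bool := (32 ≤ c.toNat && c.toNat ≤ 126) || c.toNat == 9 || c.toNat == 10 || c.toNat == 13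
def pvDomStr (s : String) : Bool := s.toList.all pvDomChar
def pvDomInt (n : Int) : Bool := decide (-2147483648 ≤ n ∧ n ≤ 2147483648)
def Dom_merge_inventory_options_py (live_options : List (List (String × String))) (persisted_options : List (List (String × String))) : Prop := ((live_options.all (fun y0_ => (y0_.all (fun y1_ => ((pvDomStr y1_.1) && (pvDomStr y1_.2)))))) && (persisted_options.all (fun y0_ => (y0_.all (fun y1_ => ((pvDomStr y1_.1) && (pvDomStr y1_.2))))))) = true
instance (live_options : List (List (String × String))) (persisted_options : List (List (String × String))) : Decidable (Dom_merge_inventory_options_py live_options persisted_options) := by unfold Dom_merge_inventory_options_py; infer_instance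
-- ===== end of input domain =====

-- B reverses A's phase order: it builds the raw (value, label) pair list, stably sorts it by
-- casefolded value, and then dedupes by a structurally recursive walk with a seen-set, instead of
-- A's dedupe-into-an-insertion-ordered-dict followed by sorting the keys with a dict lookup; same
-- return value on every input where A returns (str.casefold is ported as PySem.Str.lower — exact
-- on the ASCII Dom_ these theorems quantify over).

-- shared helper: Python's option["key"] on a dict given as an association list (first match; none = KeyError)
def pvGetItem (o : List (String × String)) (k : String) : Option String :=
  match o with
  | [] => none
  | (a, b) :: t => if a = k then some b else pvGetItem t k

-- ===== PORT A =====
def merge_inventory_options_py (live_options : List (List (String × String))) (persisted_options : List (List (String × String))) : List (List (String × String)) :=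
  -- merged: dict[str, str] = {}; for option in list(live)+list(persisted): merged.setdefault(str(option["value"]), str(option["label"]))
  let merged : PySem.Dict String String :=
    (live_options ++ persisted_options).foldl
      (fun d o => d.setdefault ((pvGetItem o "value").getD "") ((pvGetItem o "label").getD ""))
      PySem.Dict.empty
  -- [{"value": value, "label": merged[value]} for value in sorted(merged, key=str.casefold)]
  (PySem.List.sorted merged.keys (fun v => PySem.Str.lower v)).map
    (fun v => [("value", v), ("label", merged.getD v "")])

-- ===== PORT B =====
-- _emit_sorted(pairs, seen): recursive first-occurrence emitter over the sorted pair list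
def pvEmitSorted (pairs : List (String × String)) (seen : PySem.Set String) : List (List (String × String)) :=
  match pairs with
  | [] => []
  | (v, lb) :: rest =>
      if v ∈ seen then pvEmitSorted rest seen
      else [("value", v), ("label", lb)] :: pvEmitSorted rest (PySem.Set.union seen [v])

def merge_inventory_options_py_alt (live_options : List (List (String × String))) (persisted_options : List (List (String × String))) : List (List (String × String)) :=
  -- pairs = [...for o in live_options]; pairs += [...for o in persisted_options]
  let pairs : List (String × String) :=
    live_options.map (fun o => ((pvGetItem o "value").getD "", (pvGetItem o "label").getD ""))
      ++ persisted_options.map (fun o => ((pvGetItem o "value").getD "", (pvGetItem o "label").getD ""))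
  -- pairs.sort(key=lambda p: p[0].casefold()); return _emit_sorted(pairs, set())
  pvEmitSorted (PySem.List.sorted pairs (fun p => PySem.Str.lower p.1)) PySem.Set.empty

-- ===== PRECONDITION & SPEC =====
-- Pre_ excludes exactly the inputs where some option lacks a "value" or "label" key: there the
-- Python A raises KeyError (and the Python B raises too).
def Pre_merge_inventory_options_py (live_options : List (List (String × String))) (persisted_options : List (List (String × String))) : Prop :=
  ∀ o ∈ live_options ++ persisted_options, (pvGetItem o "value").isSome ∧ (pvGetItem o "label").isSome
instance (live_options : List (List (String × String))) (persisted_options : List (List (String × String))) : Decidable (Pre_merge_inventory_options_py live_options persisted_options) := by unfold Pre_merge_inventory_options_py; infer_instance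

def pvWitness_merge_inventory_options_py : (List (List (String × String))) × (List (List (String × String))) :=
  ([[("value", "a"), ("label", "A")]], [[("value", "B"), ("label", "b")]])

def Spec_merge_inventory_options_py (live_options : List (List (String × String))) (persisted_options : List (List (String × String))) (out : List (List (String × String))) : Prop := out = merge_inventory_options_py_alt live_options persisted_options
instance (live_options : List (List (String × String))) (persisted_options : List (List (String × String))) (out : List (List (String × String))) : Decidable (Spec_merge_inventory_options_py live_options persisted_options out) := by unfold Spec_merge_inventory_options_py; infer_instance

-- ===== CLAIM (what is proved, stated in full; the proofs are below) =====
def Claim_equal_merge_inventory_options_py : Prop := ∀ (live_options : List (List (String × String))) (persisted_options : List (List (String × String))), Dom_merge_inventory_options_py live_options persisted_options → Pre_merge_inventory_options_py live_options persisted_options → Spec_merge_inventory_options_py live_options persisted_options (merge_inventory_options_py live_options persisted_options)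

-- ===== LEMMAS AND PROOFS =====

-- the sort key on pairs and the insertion step of PySem's stable insertion sort
def pvKeyP (p : String × String) : String := PySem.Str.lower p.1
def pvBef (a b : String × String) : Bool := decide (pvKeyP a < pvKeyP b)
def pvIns (x : String × String) (ys : List (String × String)) : List (String × String) :=
  PySem.List.insertBy pvBef x ys

-- first-occurrence-by-value dedup with an explicit seen list (proof-side model of both programs)
def pvDD (seen : List String) : List (String × String) → List (String × String)
  | [] => []
  | p :: t => if p.1 ∈ seen then pvDD seen t else p :: pvDD (p.1 :: seen) t

-- the record both programs emit for a surviving pair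
def pvRec (p : String × String) : List (String × String) := [("value", p.1), ("label", p.2)]

theorem pvDD_congr (s₁ s₂ : List String) (l : List (String × String))
    (h : ∀ a, a ∈ s₁ ↔ a ∈ s₂) : pvDD s₁ l = pvDD s₂ l := by
  induction l generalizing s₁ s₂ with
  | nil => rfl
  | cons p t ih =>
      simp only [pvDD]
      by_cases hp : p.1 ∈ s₁
      · rw [if_pos hp, if_pos ((h p.1).mp hp), ih _ _ h]
      · rw [if_neg hp, if_neg (fun hc => hp ((h p.1).mpr hc))]
        rw [ih (p.1 :: s₁) (p.1 :: s₂) (by intro a; simp [h a])]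

theorem pvDD_subset {s : List String} {l : List (String × String)} {q : String × String}
    (h : q ∈ pvDD s l) : q ∈ l := by
  induction l generalizing s with
  | nil => simpa [pvDD] using h
  | cons p t ih =>
      simp only [pvDD] at h
      by_cases hp : p.1 ∈ s
      · rw [if_pos hp] at h; exact List.mem_cons_of_mem _ (ih h)
      · rw [if_neg hp] at h
        rcases List.mem_cons.mp h with h | h
        · exact h ▸ List.mem_cons_self
        · exact List.mem_cons_of_mem _ (ih h)

theorem pvDD_fst_not_mem {a : String} {s : List String} (l : List (String × String))
    (h : a ∈ s) : a ∉ (pvDD s l).map Prod.fst := by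
  induction l generalizing s with
  | nil => simp [pvDD]
  | cons p t ih =>
      simp only [pvDD]
      by_cases hp : p.1 ∈ s
      · rw [if_pos hp]; exact ih h
      · rw [if_neg hp]
        intro hc
        rcases List.mem_map.mp hc with ⟨q, hq, hqa⟩
        rcases List.mem_cons.mp hq with h' | h'
        · exact hp (h' ▸ hqa ▸ h)
        · exact ih (List.mem_cons_of_mem _ h) (List.mem_map.mpr ⟨q, h', hqa⟩)

theorem pvDD_fst_nodup (s : List String) (l : List (String × String)) :
    ((pvDD s l).map Prod.fst).Nodup := by
  induction l generalizing s with
  | nil => simp [pvDD]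
  | cons p t ih =>
      simp only [pvDD]
      by_cases hp : p.1 ∈ s
      · rw [if_pos hp]; exact ih s
      · rw [if_neg hp]
        simp only [List.map_cons, List.nodup_cons]
        exact ⟨pvDD_fst_not_mem t List.mem_cons_self, ih _⟩

theorem pvDD_append_singleton (s : List String) (l : List (String × String)) (x : String × String) :
    pvDD s (l ++ [x]) = if x.1 ∈ s ∨ x.1 ∈ l.map Prod.fst then pvDD s l else pvDD s l ++ [x] := by
  induction l generalizing s with
  | nil => by_cases h : x.1 ∈ s <;> simp [pvDD, h]
  | cons p t ih =>
      simp only [List.cons_append, pvDD]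
      by_cases hp : p.1 ∈ s
      · rw [if_pos hp, if_pos hp, ih s]
        by_cases hx : x.1 ∈ s ∨ x.1 ∈ t.map Prod.fst
        · rw [if_pos hx, if_pos (by rcases hx with h | h; exact Or.inl h; exact Or.inr (by simp [h]))]
        · rw [if_neg hx]
          by_cases hxp : x.1 = p.1
          · rw [if_pos (Or.inl (hxp ▸ hp))]
            exact absurd (Or.inl (hxp ▸ hp)) hx
          · rw [if_neg (by push_neg at hx ⊢; exact ⟨hx.1, by simp [hx.2, hxp]⟩)]
      · rw [if_neg hp, if_neg hp, ih (p.1 :: s)]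
        by_cases hx : x.1 ∈ p.1 :: s ∨ x.1 ∈ t.map Prod.fst
        · rw [if_pos hx, if_pos (by
            rcases hx with h | h
            · rcases List.mem_cons.mp h with h | h
              · exact Or.inr (by simp [h])
              · exact Or.inl h
            · exact Or.inr (by simp [h]))]
        · push_neg at hx
          have h1 : x.1 ∉ s := fun hc => hx.1 (List.mem_cons_of_mem _ hc)
          have h2 : x.1 ≠ p.1 := fun hc => hx.1 (by simp [hc])
          rw [if_neg (by rintro (hc | hc); exacts [hx.1 hc, hx.2 hc])]
          rw [if_neg (by
            rintro (hc | hc)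
            · exact h1 hc
            · simp only [List.map_cons, List.mem_cons] at hc
              rcases hc with hc | hc
              · exact h2 hc
              · exact hx.2 hc)]
          simp

-- D0: an element whose value is already seen disappears wherever the insertion sort puts it
theorem pvDD_ins_seen {x : String × String} {s : List String} (ys : List (String × String))
    (h : x.1 ∈ s) : pvDD s (pvIns x ys) = pvDD s ys := by
  induction ys generalizing s with
  | nil => simp [pvIns, PySem.List.insertBy, pvDD, h]
  | cons y t ih =>
      simp only [pvIns, PySem.List.insertBy]
      by_cases hb : pvBef x y
      · simp only [if_pos hb, pvDD, if_pos h]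
      · simp only [if_neg hb, pvDD]
        by_cases hy : y.1 ∈ s
        · rw [if_pos hy, if_pos hy]; exact ih h
        · rw [if_neg hy, if_neg hy]
          rw [show PySem.List.insertBy pvBef x t = pvIns x t from rfl,
              ih (List.mem_cons_of_mem _ h)]

-- D1: inserting a pair whose value already occurs in the (sorted) list does not change the dedup
theorem pvDD_ins_dup {x : String × String} {ys : List (String × String)}
    (hs : ys.Pairwise (fun a b => pvKeyP a ≤ pvKeyP b))
    (hdup : ∃ z ∈ ys, z.1 = x.1) (s : List String) :
    pvDD s (pvIns x ys) = pvDD s ys := by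
  induction ys generalizing s with
  | nil => rcases hdup with ⟨z, hz, _⟩; exact absurd hz (List.not_mem_nil)
  | cons y t ih =>
      rcases hdup with ⟨z, hz, hzx⟩
      simp only [pvIns, PySem.List.insertBy]
      by_cases hb : pvBef x y
      · -- impossible: some z with key z = key x sits in y :: t, but key x < key y ≤ key z
        exfalso
        have hxy : pvKeyP x < pvKeyP y := by simpa [pvBef] using hb
        have hyz : pvKeyP y ≤ pvKeyP z := by
          rcases List.mem_cons.mp hz with h | h
          · exact h ▸ le_refl _
          · exact (List.pairwise_cons.mp hs).1 z h
        have : pvKeyP z = pvKeyP x := by simp [pvKeyP, hzx]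
        exact absurd (lt_of_lt_of_le hxy hyz) (by rw [this]; exact lt_irrefl _)
      · simp only [if_neg hb, pvDD]
        by_cases hyx : y.1 = x.1
        · by_cases hy : y.1 ∈ s
          · rw [if_pos hy, if_pos hy]
            exact pvDD_ins_seen t (hyx ▸ hy)
          · rw [if_neg hy, if_neg hy]
            rw [show PySem.List.insertBy pvBef x t = pvIns x t from rfl,
                pvDD_ins_seen t (by simp [← hyx])]
        · have hzt : z ∈ t := by
            rcases List.mem_cons.mp hz with h | h
            · exact absurd (h ▸ hzx) hyx
            · exact h
          by_cases hy : y.1 ∈ s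
          · rw [if_pos hy, if_pos hy]
            exact ih (List.pairwise_cons.mp hs).2 ⟨z, hzt, hzx⟩ s
          · rw [if_neg hy, if_neg hy]
            rw [show PySem.List.insertBy pvBef x t = pvIns x t from rfl,
                ih (List.pairwise_cons.mp hs).2 ⟨z, hzt, hzx⟩ (y.1 :: s)]

theorem pvIns_of_forall_bef {x : String × String} {l : List (String × String)}
    (h : ∀ z ∈ l, pvBef x z = true) : pvIns x l = x :: l := by
  cases l with
  | nil => rfl
  | cons y t => simp [pvIns, PySem.List.insertBy, h y List.mem_cons_self]

-- a seen entry that never occurs as a value in the list is irrelevant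
theorem pvDD_cons_irrel {a : String} {l : List (String × String)} (s : List String)
    (h : a ∉ l.map Prod.fst) : pvDD (a :: s) l = pvDD s l := by
  induction l generalizing s with
  | nil => rfl
  | cons p t ih =>
      have hpa : p.1 ≠ a := by
        intro hc; exact h (by simp [← hc])
      have ht : a ∉ t.map Prod.fst := by
        intro hc; exact h (by simp [hc])
      simp only [pvDD]
      by_cases hp : p.1 ∈ s
      · rw [if_pos (List.mem_cons_of_mem _ hp), if_pos hp]
        exact ih s ht
      · rw [if_neg (by simp [List.mem_cons, hpa, hp]), if_neg hp]
        congr 1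
        rw [pvDD_congr (p.1 :: a :: s) (a :: p.1 :: s) t
              (by intro b; constructor <;> (intro hb; simp at hb ⊢; tauto)),
            ih _ ht]

-- D2: inserting a pair with a fresh value commutes with the dedup
theorem pvDD_ins_fresh {x : String × String} {ys : List (String × String)}
    (hs : ys.Pairwise (fun a b => pvKeyP a ≤ pvKeyP b))
    (hfresh : ∀ z ∈ ys, z.1 ≠ x.1) {s : List String} (hxs : x.1 ∉ s) :
    pvDD s (pvIns x ys) = pvIns x (pvDD s ys) := by
  induction ys generalizing s with
  | nil => simp [pvIns, PySem.List.insertBy, pvDD, hxs]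
  | cons y t ih =>
      simp only [pvIns, PySem.List.insertBy]
      by_cases hb : pvBef x y
      · -- x goes to the front; every element of y :: t has key > key x, so it also fronts the dedup
        have hxy : pvKeyP x < pvKeyP y := by
          simpa only [pvBef, decide_eq_true_eq] using hb
        have hfr : x.1 ∉ (y :: t).map Prod.fst := by
          intro hc
          rcases List.mem_map.mp hc with ⟨z, hz, hzx⟩
          exact hfresh z hz hzx
        have hbef : ∀ z ∈ pvDD s (y :: t), pvBef x z = true := by
          intro z hz
          have hzmem := pvDD_subset hz
          have hle : pvKeyP y ≤ pvKeyP z := by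
            rcases List.mem_cons.mp hzmem with h | h
            · exact h ▸ le_refl _
            · exact (List.pairwise_cons.mp hs).1 z h
          simp only [pvBef, decide_eq_true_eq]
          exact lt_of_lt_of_le hxy hle
        rw [if_pos hb]
        have e1 : pvDD s (x :: y :: t) = x :: pvDD (x.1 :: s) (y :: t) := by
          show (if x.1 ∈ s then pvDD s (y :: t) else x :: pvDD (x.1 :: s) (y :: t)) = _
          rw [if_neg hxs]
        rw [e1, pvDD_cons_irrel s hfr,
            show PySem.List.insertBy pvBef x (pvDD s (y :: t)) = pvIns x (pvDD s (y :: t)) from rfl,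
            pvIns_of_forall_bef hbef]
      · simp only [if_neg hb, pvDD]
        by_cases hy : y.1 ∈ s
        · rw [if_pos hy, if_pos hy]
          rw [show PySem.List.insertBy pvBef x t = pvIns x t from rfl]
          exact ih (List.pairwise_cons.mp hs).2 (fun z hz => hfresh z (List.mem_cons_of_mem _ hz)) hxs
        · rw [if_neg hy, if_neg hy]
          rw [show PySem.List.insertBy pvBef x t = pvIns x t from rfl]
          rw [ih (List.pairwise_cons.mp hs).2 (fun z hz => hfresh z (List.mem_cons_of_mem _ hz))
              (by simp [hxs, Ne.symm (hfresh y List.mem_cons_self)])]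
          simp [pvIns, PySem.List.insertBy, if_neg hb]

-- sorted (l ++ [x]) peels the last insertion
theorem pvSorted_append_singleton (l : List (String × String)) (x : String × String) :
    PySem.List.sorted (l ++ [x]) pvKeyP = pvIns x (PySem.List.sorted l pvKeyP) := by
  rw [PySem.List.sorted_eq_foldl_insertBy, PySem.List.sorted_eq_foldl_insertBy, List.foldl_append]
  rfl

-- main commutation: dedupe-after-sort = sort-after-dedupe
theorem pvDD_sorted_comm (l : List (String × String)) :
    pvDD [] (PySem.List.sorted l pvKeyP) = PySem.List.sorted (pvDD [] l) pvKeyP := by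
  induction l using List.reverseRecOn with
  | nil => rfl
  | append_singleton l x ih =>
      rw [pvSorted_append_singleton, pvDD_append_singleton]
      by_cases hx : x.1 ∈ l.map Prod.fst
      · rw [if_pos (Or.inr hx)]
        rw [pvDD_ins_dup (PySem.List.sorted_pairwise l pvKeyP)
            (by rcases List.mem_map.mp hx with ⟨z, hz, hzx⟩
                exact ⟨z, (PySem.List.mem_sorted l pvKeyP false z).mpr hz, hzx⟩) [],
            ih]
      · rw [if_neg (by simp [hx])]
        rw [pvDD_ins_fresh (PySem.List.sorted_pairwise l pvKeyP)
            (by intro z hz hc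
                exact hx (List.mem_map.mpr ⟨z, (PySem.List.mem_sorted l pvKeyP false z).mp hz, hc⟩))
            (List.not_mem_nil), ih, ← pvSorted_append_singleton]

-- mapping fst commutes with the stable sort (the keys sort exactly like the pairs)
theorem pvIns_map_fst (x : String × String) (ys : List (String × String)) :
    (pvIns x ys).map Prod.fst
      = PySem.List.insertBy (fun a b => decide (PySem.Str.lower a < PySem.Str.lower b)) x.1 (ys.map Prod.fst) := by
  induction ys with
  | nil => rfl
  | cons y t ih =>
      simp only [pvIns, PySem.List.insertBy, List.map_cons]
      by_cases hb : pvBef x y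
      · rw [if_pos hb, if_pos (by simpa [pvBef, pvKeyP] using hb)]
        simp
      · rw [if_neg hb, if_neg (by simpa [pvBef, pvKeyP] using hb)]
        rw [List.map_cons, show PySem.List.insertBy pvBef x t = pvIns x t from rfl, ih]

theorem pvSorted_map_fst (l : List (String × String)) :
    PySem.List.sorted (l.map Prod.fst) (fun v => PySem.Str.lower v)
      = (PySem.List.sorted l pvKeyP).map Prod.fst := by
  induction l using List.reverseRecOn with
  | nil => rfl
  | append_singleton l x ih =>
      rw [List.map_append, List.map_singleton]
      rw [PySem.List.sorted_eq_foldl_insertBy, List.foldl_append,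
          ← PySem.List.sorted_eq_foldl_insertBy]
      rw [pvSorted_append_singleton, pvIns_map_fst, ih]
      rfl

-- the setdefault loop collects exactly the first-occurrence pairs
theorem pvSetdefault_foldl (ps : List (String × String)) (d : PySem.Dict String String) :
    (ps.foldl (fun d p => d.setdefault p.1 p.2) d).items = d.items ++ pvDD d.keys ps := by
  induction ps generalizing d with
  | nil => simp [pvDD]
  | cons p t ih =>
      simp only [List.foldl_cons, pvDD]
      by_cases hp : p.1 ∈ d.keys
      · rw [if_pos hp, PySem.Dict.setdefault_of_contains d p.2 ((PySem.Dict.contains_iff_mem_keys d p.1).mpr hp)]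
        exact ih d
      · have hnc : d.contains p.1 = false := by
          cases hcc : d.contains p.1 with
          | false => rfl
          | true => exact absurd ((PySem.Dict.contains_iff_mem_keys d p.1).mp hcc) hp
        rw [if_neg hp, PySem.Dict.setdefault_of_not_contains d p.2 hnc, ih]
        rw [PySem.Dict.items_insert_of_not_contains d p.2 hnc]
        rw [pvDD_congr (d.insert p.1 p.2).keys (p.1 :: d.keys) t (by
          intro a
          rw [PySem.Dict.mem_keys_insert]
          simp)]
        simp

-- B's recursive emitter produces exactly the records of the deduped list
theorem pvEmitSorted_eq (l : List (String × String)) (s : PySem.Set String) (s' : List String)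
    (h : ∀ a, a ∈ s ↔ a ∈ s') : pvEmitSorted l s = (pvDD s' l).map pvRec := by
  induction l generalizing s s' with
  | nil => rfl
  | cons p t ih =>
      obtain ⟨v, lb⟩ := p
      simp only [pvEmitSorted, pvDD]
      by_cases hv : v ∈ s
      · rw [if_pos hv, if_pos ((h v).mp hv)]
        exact ih s s' h
      · rw [if_neg hv, if_neg (fun hc => hv ((h v).mpr hc))]
        rw [ih (PySem.Set.union s [v]) (v :: s') (by
          intro a
          rw [PySem.Set.mem_union, List.mem_cons, h a]
          simp [or_comm])]
        rfl

-- the two ports, written over the shared option list os = live ++ persisted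
theorem pvMain (os : List (List (String × String))) :
    (PySem.List.sorted
        (os.foldl (fun d o => d.setdefault ((pvGetItem o "value").getD "") ((pvGetItem o "label").getD "")) PySem.Dict.empty).keys
        (fun v => PySem.Str.lower v)).map
      (fun v => [("value", v), ("label",
        (os.foldl (fun d o => d.setdefault ((pvGetItem o "value").getD "") ((pvGetItem o "label").getD "")) PySem.Dict.empty).getD v "")])
    = pvEmitSorted
        (PySem.List.sorted (os.map (fun o => ((pvGetItem o "value").getD "", (pvGetItem o "label").getD ""))) pvKeyP)
        PySem.Set.empty := by
  set f : List (String × String) → String × String :=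
    fun o => ((pvGetItem o "value").getD "", (pvGetItem o "label").getD "") with hf
  set pairs : List (String × String) := os.map f with hpairs
  set M : PySem.Dict String String :=
    os.foldl (fun d o => d.setdefault ((pvGetItem o "value").getD "") ((pvGetItem o "label").getD "")) PySem.Dict.empty with hMdef
  have hM : M = pairs.foldl (fun d p => d.setdefault p.1 p.2) PySem.Dict.empty :=
    (List.foldl_map (f := f) (g := fun (d : PySem.Dict String String) (p : String × String) => d.setdefault p.1 p.2)).symm
  have hitems : M.items = pvDD [] pairs := by
    rw [hM, pvSetdefault_foldl]
    rfl
  have hkeys : M.keys = (pvDD [] pairs).map Prod.fst := by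
    simp only [PySem.Dict.keys, hitems]
  have hnd : M.keys.Nodup := by rw [hkeys]; exact pvDD_fst_nodup [] pairs
  have hlook : ∀ p ∈ PySem.List.sorted (pvDD [] pairs) pvKeyP, M.getD p.1 "" = p.2 := by
    intro p hp
    have hmem : p ∈ pvDD [] pairs := (PySem.List.mem_sorted _ _ _ p).mp hp
    have hmem' : (p.1, p.2) ∈ M.items := by rw [hitems]; exact hmem
    exact PySem.Dict.getD_of_mem_items M hmem' hnd ""
  rw [hkeys, pvSorted_map_fst, List.map_map]
  rw [List.map_congr_left (fun p hp => by
    show [("value", p.1), ("label", M.getD p.1 "")] = pvRec p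
    rw [hlook p hp]; rfl)]
  rw [← pvDD_sorted_comm,
      pvEmitSorted_eq (PySem.List.sorted pairs pvKeyP) PySem.Set.empty [] (by intro a; rfl)]

theorem merge_inventory_options_py_eq (live_options persisted_options : List (List (String × String))) :
    merge_inventory_options_py live_options persisted_options
      = merge_inventory_options_py_alt live_options persisted_options := by
  have := pvMain (live_options ++ persisted_options)
  simpa [merge_inventory_options_py, merge_inventory_options_py_alt, List.map_append] using this

-- ===== VERDICT (by name: the statement is the Claim_ definition above) =====
theorem merge_inventory_options_py_spec : Claim_equal_merge_inventory_options_py := by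
  intro live persisted _ _
  unfold Spec_merge_inventory_options_py
  exact merge_inventory_options_py_eq live persisted
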